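-- pv_equiv track=rewrite | github.com/JLifeOne/Smart-Shopper | scripts/validate_food_dictionary_csv.py | iter_csv_blocks
-- ===== SOURCE A (Python) =====
-- def iter_csv_blocks(lines: list[str]) -> list[tuple[int, list[str]]]:
--     blocks: list[tuple[int, list[str]]] = []
--     i = 0
--     while i < len(lines):
--         line = lines[i].lstrip("\ufeff")
--         if line.startswith("Item,Category,"):
--             start_line_no = i + 1
--             block = [line]
--             i += 1
--             while i < len(lines):
--                 next_line = lines[i]
--                 if not next_line.strip():
--                     break
--                 if next_line.startswith("---") or next_line.startswith("#"):
--                     break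
--                 if next_line.startswith("## "):
--                     break
--                 block.append(next_line)
--                 i += 1
--             blocks.append((start_line_no, block))
--         else:
--             i += 1
--     return blocks
-- ===== SOURCE B (Python) =====
-- def iter_csv_blocks(lines: list[str]) -> list[tuple[int, list[str]]]:
--     def is_term(l: str) -> bool:
--         return not l.strip() or l.startswith("---") or l.startswith("#")
--
--     blocks: list[tuple[int, list[str]]] = []
--     n = len(lines)
--     i = 0
--     while i < n:
--         # find the end of the current terminator-free segment
--         j = i
--         while j < n and not is_term(lines[j]):
--             j += 1
--         # the first header inside the segment starts a block running to the segment end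
--         for k in range(i, j):
--             head = lines[k].lstrip("\ufeff")
--             if head.startswith("Item,Category,"):
--                 blocks.append((k + 1, [head] + lines[k + 1 : j]))
--                 break
--         i = j + 1
--     return blocks
-- ===== Notes on version B (the rewrite author's own statement) =====
-- stated objective: alternative
-- what changed: A scans line by line with a nested inner while that grows a block one line at a time after seeing a header; B first splits the input at terminator lines (blank/---/#) and, per terminator-free segment, takes the first header line as a block running to the segment end.
import Mathlib
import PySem

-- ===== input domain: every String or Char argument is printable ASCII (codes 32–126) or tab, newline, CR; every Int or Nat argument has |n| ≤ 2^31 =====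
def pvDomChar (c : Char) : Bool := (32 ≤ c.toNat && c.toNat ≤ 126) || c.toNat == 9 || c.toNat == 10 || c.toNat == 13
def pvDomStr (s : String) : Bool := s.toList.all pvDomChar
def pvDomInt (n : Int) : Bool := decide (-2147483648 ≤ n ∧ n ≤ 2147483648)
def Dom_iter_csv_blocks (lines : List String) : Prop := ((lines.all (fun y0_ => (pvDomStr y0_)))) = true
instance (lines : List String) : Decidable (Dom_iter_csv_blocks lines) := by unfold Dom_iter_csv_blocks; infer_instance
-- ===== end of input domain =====

-- B replaces A's header-driven nested while loops (find a header, then collect lines one by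
-- one) by a segment decomposition: scan to the end of the current terminator-free segment
-- first, then take the first header in it as a block running to the segment end (objective:
-- alternative).

-- ===== PORT A =====
-- line.lstrip("\ufeff"): drop leading chars equal to '\ufeff' (exact: lstrip(chars) drops leading members of chars)
def pvBomStrip (s : String) : String := String.ofList (s.toList.dropWhile (fun c => c == '\ufeff'))

-- A's inner while loop: returns (block, i, remaining suffix of lines)
def pvInnerA (i : Int) (rest : List String) (block : List String) : List String × Int × List String :=
  match rest with
  | [] => (block, i, [])
  | next :: ls =>
    if PySem.Str.strip next == "" then (block, i, next :: ls)
    else if PySem.Str.startswith next "---" || PySem.Str.startswith next "#" then (block, i, next :: ls)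
    else if PySem.Str.startswith next "## " then (block, i, next :: ls)
    else pvInnerA (i + 1) ls (block ++ [next])

-- termination helper for the outer loop (cited in decreasing_by)
theorem pvInnerA_len : ∀ (rest : List String) (i : Int) (block : List String),
    (pvInnerA i rest block).2.2.length ≤ rest.length := by
  intro rest
  induction rest with
  | nil => intro i block; simp [pvInnerA]
  | cons next ls ih =>
    intro i block
    simp only [pvInnerA]
    split_ifs <;> simp
    exact le_trans (ih _ _) (Nat.le_succ _)

-- A's outer while loop over the remaining suffix, i the absolute index, blocks the accumulator
def pvOuterA (i : Int) (rest : List String) (blocks : List (Int × List String)) :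
    List (Int × List String) :=
  match rest with
  | [] => blocks
  | cur :: ls =>
    let line := pvBomStrip cur
    if PySem.Str.startswith line "Item,Category," then
      let r := pvInnerA (i + 1) ls [line]
      pvOuterA r.2.1 r.2.2 (blocks ++ [(i + 1, r.1)])
    else pvOuterA (i + 1) ls blocks
termination_by rest.length
decreasing_by
  · exact Nat.lt_succ_of_le (pvInnerA_len ls (i + 1) [pvBomStrip cur])
  · simp

def iter_csv_blocks (lines : List String) : List (Int × List String) := pvOuterA 0 lines []

-- ===== PORT B =====
-- B's is_term
def pvIsTerm (l : String) : Bool :=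
  PySem.Str.strip l == "" || PySem.Str.startswith l "---" || PySem.Str.startswith l "#"

-- B's for-k loop over the current segment: first header line (pos its absolute index) and the
-- block it starts ([head] + rest of the segment)
def pvFindHead (pos : Int) : List String → Option (Int × List String)
  | [] => none
  | l :: ls =>
    let head := pvBomStrip l
    if PySem.Str.startswith head "Item,Category," then some (pos + 1, head :: ls)
    else pvFindHead (pos + 1) ls

-- B's outer while loop: one step per terminator-free segment (the j-scan is the takeWhile)
def pvSegB (i : Int) (rest : List String) : List (Int × List String) :=
  match rest with
  | [] => []
  | x :: xs =>
    let seg := (x :: xs).takeWhile (fun l => !pvIsTerm l)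
    (match pvFindHead i seg with
     | some b => [b]
     | none => []) ++ pvSegB (i + seg.length + 1) ((x :: xs).drop (seg.length + 1))
termination_by rest.length
decreasing_by
  simp

def iter_csv_blocks_alt (lines : List String) : List (Int × List String) := pvSegB 0 lines

-- ===== PRECONDITION & SPEC =====
def Spec_iter_csv_blocks (lines : List String) (out : List (Int × List String)) : Prop := out = iter_csv_blocks_alt lines
instance (lines : List String) (out : List (Int × List String)) : Decidable (Spec_iter_csv_blocks lines out) := by unfold Spec_iter_csv_blocks; infer_instance

-- ===== CLAIM (what is proved, stated in full; the proofs are below) =====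
def Claim_equal_iter_csv_blocks : Prop := ∀ (lines : List String), Dom_iter_csv_blocks lines → Spec_iter_csv_blocks lines (iter_csv_blocks lines)

-- ===== LEMMAS AND PROOFS =====

-- startswith as list-prefix, in both directions
theorem pvStartswith_prefix (l p : String) (h : PySem.Str.startswith l p = true) :
    p.toList <+: l.toList := by
  apply List.isPrefixOf_iff_prefix.mp
  simpa [PySem.Str.startswith, PySem.Chars.startswith] using h

theorem pvStartswith_false (l p : String) (h : ¬ (p.toList <+: l.toList)) :
    PySem.Str.startswith l p = false := by
  rw [Bool.eq_false_iff]
  intro htrue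
  exact h (pvStartswith_prefix l p htrue)

-- on the ASCII domain there is no BOM character, so lstrip("\ufeff") is the identity
theorem pvBomStrip_eq_self (s : String) (h : pvDomStr s = true) : pvBomStrip s = s := by
  unfold pvBomStrip
  have hd : s.toList.dropWhile (fun c => c == '\ufeff') = s.toList := by
    cases hs : s.toList with
    | nil => simp
    | cons c t =>
      have hall : ((c :: t).all pvDomChar) = true := by
        rw [← hs]
        simpa [pvDomStr] using h
      have hc : pvDomChar c = true := by
        simp only [List.all_cons, Bool.and_eq_true] at hall
        exact hall.1
      have hne : (c == '\ufeff') = false := by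
        apply beq_eq_false_iff_ne.mpr
        intro hcc
        subst hcc
        exact absurd hc (by decide)
      simp [List.dropWhile_cons, hne]
  rw [hd]
  exact String.ofList_toList

-- a line starting with "## " also starts with "#"
theorem pvHashPrefix (l : String) (h : PySem.Str.startswith l "## " = true) :
    PySem.Str.startswith l "#" = true := by
  have h1 : ("## ".toList) <+: l.toList := pvStartswith_prefix l _ h
  have h2 : ("#".toList) <+: ("## ".toList) := by decide
  simpa [PySem.Str.startswith, PySem.Chars.startswith, List.isPrefixOf_iff_prefix]
    using h2.trans h1

-- a header line is never a terminator line
theorem pvHeader_not_term (l : String) (h : PySem.Str.startswith l "Item,Category," = true) :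
    pvIsTerm l = false := by
  obtain ⟨t, ht⟩ := pvStartswith_prefix l _ h
  have hl : l.toList = 'I' :: ("tem,Category,".toList ++ t) := by
    rw [← ht]; rfl
  unfold pvIsTerm
  have h1 : (PySem.Str.strip l == "") = false := by
    apply beq_eq_false_iff_ne.mpr
    intro heq
    have h0 := congrArg String.toList heq
    simp only [PySem.Str.strip, String.toList_ofList] at h0
    simp only [PySem.Chars.strip, PySem.Chars.lstrip, PySem.Chars.rstrip, hl] at h0
    rw [List.dropWhile_cons] at h0
    have hIspace : PySem.Chars.isspace 'I' = false := by decide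
    rw [hIspace] at h0
    simp only [Bool.false_eq_true, if_false] at h0
    have hall : ∀ x ∈ ('I' :: ("tem,Category,".toList ++ t)).reverse,
        PySem.Chars.isspace x = true := by
      apply List.dropWhile_eq_nil_iff.mp
      simpa using h0
    have := hall 'I' (by simp)
    exact absurd this (by decide)
  have h2 : PySem.Str.startswith l "---" = false := by
    apply pvStartswith_false
    rw [hl]
    rintro ⟨t2, ht2⟩
    simp at ht2
  have h3 : PySem.Str.startswith l "#" = false := by
    apply pvStartswith_false
    rw [hl]
    rintro ⟨t2, ht2⟩
    simp at ht2
  rw [h1, h2, h3]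
  rfl

-- A's inner loop is takeWhile/dropWhile at the not-a-terminator predicate
theorem pvInnerA_eq : ∀ (ls : List String) (i : Int) (block : List String),
    pvInnerA i ls block =
      (block ++ ls.takeWhile (fun l => !pvIsTerm l),
       i + ((ls.takeWhile (fun l => !pvIsTerm l)).length : Int),
       ls.dropWhile (fun l => !pvIsTerm l)) := by
  intro ls
  induction ls with
  | nil => intro i block; simp [pvInnerA]
  | cons next t ih =>
    intro i block
    by_cases hterm : pvIsTerm next = true
    · have hstop : pvInnerA i (next :: t) block = (block, i, next :: t) := by
        unfold pvIsTerm at hterm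
        simp only [pvInnerA]
        by_cases c1 : (PySem.Str.strip next == "") = true
        · rw [if_pos c1]
        · rw [if_neg c1]
          have c1' : (PySem.Str.strip next == "") = false := Bool.eq_false_iff.mpr c1
          by_cases c2 : (PySem.Str.startswith next "---" || PySem.Str.startswith next "#") = true
          · rw [if_pos c2]
          · exfalso
            apply c2
            rw [c1'] at hterm
            simpa only [Bool.false_or] using hterm
      rw [hstop]
      simp [List.takeWhile_cons, List.dropWhile_cons, hterm]
    · have hterm' : pvIsTerm next = false := by simpa using hterm
      have hparts := hterm'
      unfold pvIsTerm at hparts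
      simp only [Bool.or_eq_false_iff] at hparts
      obtain ⟨⟨hs, h3d⟩, h1h⟩ := hparts
      have hd : (PySem.Str.startswith next "---" || PySem.Str.startswith next "#") = false := by
        rw [h3d, h1h]
        rfl
      have hh : PySem.Str.startswith next "## " = false := by
        cases hc : PySem.Str.startswith next "## " with
        | false => rfl
        | true =>
          have hcc := pvHashPrefix next hc
          rw [hcc] at h1h
          exact Bool.noConfusion h1h
      have step : pvInnerA i (next :: t) block = pvInnerA (i + 1) t (block ++ [next]) := by
        simp only [pvInnerA]
        split_ifs with c1 c2 c3
        · exact absurd c1 (by rw [hs]; exact Bool.noConfusion)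
        · exact absurd c2 (by rw [hd]; exact Bool.noConfusion)
        · exact absurd c3 (by rw [hh]; exact Bool.noConfusion)
        · rfl
      rw [step, ih]
      have htw : (next :: t).takeWhile (fun l => !pvIsTerm l)
          = next :: t.takeWhile (fun l => !pvIsTerm l) := by
        simp [List.takeWhile_cons, hterm']
      have hdw : (next :: t).dropWhile (fun l => !pvIsTerm l)
          = t.dropWhile (fun l => !pvIsTerm l) := by
        simp [List.dropWhile_cons, hterm']
      rw [htw, hdw]
      simp only [List.length_cons, ← List.append_cons]
      push_cast
      ring_nf

-- the head of a dropWhile result fails the predicate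
theorem pvDropWhileHead {α : Type} (p : α → Bool) (ls : List α) (x : α) (xs : List α)
    (h : ls.dropWhile p = x :: xs) : p x = false := by
  induction ls with
  | nil => simp at h
  | cons a t ih =>
    rw [List.dropWhile_cons] at h
    by_cases ha : p a = true
    · rw [ha] at h
      simp only [if_true] at h
      exact ih h
    · have ha' : p a = false := by simpa using ha
      rw [ha'] at h
      simp only [Bool.false_eq_true, if_false] at h
      injection h with h1 h2
      rw [← h1]
      exact ha'

-- B skips a terminator line
theorem pvSegB_term (j : Int) (l : String) (xs : List String) (h : pvIsTerm l = true) :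
    pvSegB j (l :: xs) = pvSegB (j + 1) xs := by
  simp only [pvSegB]
  simp [List.takeWhile_cons, h, pvFindHead]

-- B skips a non-terminator, non-header line
theorem pvSegB_skip (j : Int) (l : String) (xs : List String)
    (hterm : pvIsTerm l = false)
    (hhead : PySem.Str.startswith (pvBomStrip l) "Item,Category," = false) :
    pvSegB j (l :: xs) = pvSegB (j + 1) xs := by
  have hheadC : PySem.Chars.startswith (pvBomStrip l).toList ['I', 't', 'e', 'm', ',', 'C', 'a', 't', 'e', 'g', 'o', 'r', 'y', ','] = false := by
    simpa using hhead
  cases xs with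
  | nil =>
    simp [pvSegB, List.takeWhile_cons, hterm, pvFindHead, hheadC]
  | cons y ys =>
    simp only [pvSegB]
    simp only [List.takeWhile_cons, hterm, Bool.not_false, if_true]
    simp only [pvFindHead, hhead, hheadC, Bool.false_eq_true, if_false]
    simp only [List.length_cons, List.drop_succ_cons]
    congr 1
    congr 1
    push_cast
    ring

-- the main simulation: the line-by-line loop of A equals the segment loop of B
theorem pvMain : ∀ (n : Nat) (rest : List String) (i : Int) (blocks : List (Int × List String)),
    rest.length ≤ n → (∀ l ∈ rest, pvBomStrip l = l) →
    pvOuterA i rest blocks = blocks ++ pvSegB i rest := by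
  intro n
  induction n with
  | zero =>
    intro rest i blocks hlen _
    cases rest with
    | nil => simp [pvOuterA, pvSegB]
    | cons _ _ => simp at hlen
  | succ n ih =>
    intro rest i blocks hlen hbom
    cases rest with
    | nil => simp [pvOuterA, pvSegB]
    | cons cur ls =>
      have hcur : pvBomStrip cur = cur := hbom cur (by simp)
      have hls : ∀ l ∈ ls, pvBomStrip l = l := fun l hl => hbom l (by simp [hl])
      have hlen' : ls.length ≤ n := by simpa using hlen
      by_cases hhead : PySem.Str.startswith (pvBomStrip cur) "Item,Category," = true
      · -- header line: A collects the block with its inner loop; B finds it first in the segment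
        have hheadc : PySem.Str.startswith cur "Item,Category," = true := hcur ▸ hhead
        have hterm : pvIsTerm cur = false := pvHeader_not_term cur hheadc
        set p : String → Bool := fun l => !pvIsTerm l with hp
        set tw := ls.takeWhile p with htw
        set dw := ls.dropWhile p with hdw
        have hA : pvOuterA i (cur :: ls) blocks
            = pvOuterA (i + 1 + (tw.length : Int)) dw (blocks ++ [(i + 1, cur :: tw)]) := by
          simp only [pvOuterA, hcur, hheadc, if_true]
          rw [pvInnerA_eq]
          simp [htw, hdw, hp]
        have hdwlen : dw.length ≤ n :=
          le_trans (by simpa [hdw] using (List.dropWhile_sublist (l := ls) (p := p)).length_le) hlen'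
        have hdwmem : ∀ l ∈ dw, pvBomStrip l = l := fun l hl =>
          hls l ((List.dropWhile_sublist (l := ls) (p := p)).subset (hdw ▸ hl))
        rw [hA, ih dw _ _ hdwlen hdwmem]
        -- B side
        simp only [pvSegB]
        have hseg : (cur :: ls).takeWhile p = cur :: tw := by
          simp [List.takeWhile_cons, hp, hterm, htw]
        have hheadC : PySem.Chars.startswith cur.toList ['I', 't', 'e', 'm', ',', 'C', 'a', 't', 'e', 'g', 'o', 'r', 'y', ','] = true := by
          simpa using hheadc
        have hfind : pvFindHead i (cur :: tw) = some (i + 1, cur :: tw) := by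
          simp [pvFindHead, hcur, hheadC]
        have hdweq : dw = ls.drop tw.length := by
          have h1 : tw ++ dw = ls := by simp [htw, hdw]
          calc dw = (tw ++ dw).drop tw.length := by simp
            _ = ls.drop tw.length := by rw [h1]
        rw [show ((cur :: ls).takeWhile fun l => !pvIsTerm l) = cur :: tw from hseg, hfind]
        simp only [List.length_cons, List.drop_succ_cons]
        have hrest : pvSegB (i + 1 + (tw.length : Int)) dw
            = pvSegB (i + (((tw.length : Nat) + 1 : Nat) : Int) + 1) (ls.drop (tw.length + 1)) := by
          cases hdwc : dw with
          | nil =>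
            have hnil : ls.drop (tw.length + 1) = [] := by
              have h2 : ls.drop (tw.length + 1) = (ls.drop tw.length).drop 1 := by
                rw [List.drop_drop]
              rw [h2, ← hdweq, hdwc]
              simp
            rw [hnil]
            simp only [pvSegB]
          | cons x xs =>
            have hxterm : pvIsTerm x = true := by
              have hx := pvDropWhileHead p ls x xs (by rw [← hdw]; exact hdwc)
              simpa [hp] using hx
            have hxs : xs = ls.drop (tw.length + 1) := by
              have h2 : ls.drop (tw.length + 1) = (ls.drop tw.length).drop 1 := by
                rw [List.drop_drop]
              rw [h2, ← hdweq, hdwc]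
              simp
            rw [pvSegB_term _ _ _ hxterm, hxs]
            congr 1
            push_cast
            ring
        rw [hrest]
        simp
      · -- not a header line: both sides skip it
        have hhead' : PySem.Str.startswith (pvBomStrip cur) "Item,Category," = false := by
          simpa using hhead
        have hA : pvOuterA i (cur :: ls) blocks = pvOuterA (i + 1) ls blocks := by
          simp only [pvOuterA, hhead']
          simp
        rw [hA, ih ls _ _ hlen' hls]
        by_cases hterm : pvIsTerm cur = true
        · rw [pvSegB_term _ _ _ hterm]
        · rw [pvSegB_skip _ _ _ (by simpa using hterm) hhead']

-- ===== VERDICT (by name: the statement is the Claim_ definition above) =====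
theorem iter_csv_blocks_spec : Claim_equal_iter_csv_blocks := by
  intro lines hdom
  unfold Spec_iter_csv_blocks iter_csv_blocks iter_csv_blocks_alt
  have hdom' : ∀ l ∈ lines, pvDomStr l = true := by
    simpa [Dom_iter_csv_blocks, List.all_eq_true] using hdom
  have hbom : ∀ l ∈ lines, pvBomStrip l = l := fun l hl =>
    pvBomStrip_eq_self l (hdom' l hl)
  simpa using pvMain lines.length lines 0 [] le_rfl hbom
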